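-- pv_equiv track=rewrite | github.com/Maytide/Miscellaneous | Karger Min Cut/KargerMinCut.py | node_map
-- ===== SOURCE A (Python) =====
-- def node_map(edge_list):
--     node_counter = 0
--     enumerated_edge_list = [] # List of edges, with nodes mapped from zero -> num_nodes-1
--     enumeration_map_fwd = {}
--     enumeration_map_inv = {}
--     for a, b in edge_list:
--         if a not in enumeration_map_fwd:
--             enumeration_map_fwd[a] = node_counter
--             enumeration_map_inv[node_counter] = a
--             node_counter += 1
--
--         if b not in enumeration_map_fwd:
--             enumeration_map_fwd[b] = node_counter
--             enumeration_map_inv[node_counter] = b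
--             node_counter += 1
--
--         enumerated_edge_list.append((enumeration_map_fwd[a], enumeration_map_fwd[b]))
--
--     return enumerated_edge_list, enumeration_map_inv, node_counter
-- ===== SOURCE B (Python) =====
-- def node_map(edge_list):
--     # Two-pass decomposition: build the index table first, then remap edges.
--     nodes = list(dict.fromkeys(n for a, b in edge_list for n in (a, b)))
--     fwd = {node: i for i, node in enumerate(nodes)}
--     inv = {i: node for i, node in enumerate(nodes)}
--     return [(fwd[a], fwd[b]) for a, b in edge_list], inv, len(nodes)
-- ===== Notes on version B (the rewrite author's own statement) =====
-- stated objective: simpler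
-- what changed: Replaces the single interleaved loop that grows two dicts and the output together by two separate passes: first collect the distinct nodes in first-appearance order (dict.fromkeys) and build both maps from enumerate, then remap all edges in one comprehension.
import Mathlib
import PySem

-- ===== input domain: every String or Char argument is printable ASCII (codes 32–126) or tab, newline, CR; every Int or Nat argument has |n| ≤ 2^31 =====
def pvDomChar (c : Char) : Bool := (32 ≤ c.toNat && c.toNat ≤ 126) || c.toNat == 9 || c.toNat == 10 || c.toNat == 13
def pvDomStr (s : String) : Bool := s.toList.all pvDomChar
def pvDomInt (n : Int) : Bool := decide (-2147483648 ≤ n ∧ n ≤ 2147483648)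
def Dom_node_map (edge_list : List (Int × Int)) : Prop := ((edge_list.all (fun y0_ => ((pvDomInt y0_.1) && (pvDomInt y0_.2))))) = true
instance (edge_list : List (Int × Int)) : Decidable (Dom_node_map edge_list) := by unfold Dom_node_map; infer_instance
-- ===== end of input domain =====

-- B replaces A's single interleaved loop by two passes (index table, then edge remap); objective: simpler.

-- ===== PORT A =====
-- one loop iteration of A: state = (enumerated_edge_list, enumeration_map_fwd, enumeration_map_inv, node_counter)
def nodeMapStep (st : (List (Int × Int)) × PySem.Dict Int Int × PySem.Dict Int Int × Int)
    (e : Int × Int) : (List (Int × Int)) × PySem.Dict Int Int × PySem.Dict Int Int × Int :=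
  let (out, fwd, inv, cnt) := st
  let (fwd, inv, cnt) :=
    if fwd.contains e.1 then (fwd, inv, cnt) else (fwd.insert e.1 cnt, inv.insert cnt e.1, cnt + 1)
  let (fwd, inv, cnt) :=
    if fwd.contains e.2 then (fwd, inv, cnt) else (fwd.insert e.2 cnt, inv.insert cnt e.2, cnt + 1)
  -- fwd[a], fwd[b]: the keys are guaranteed present at this point, so getD is exact
  (out ++ [(fwd.getD e.1 0, fwd.getD e.2 0)], fwd, inv, cnt)

def node_map (edge_list : List (Int × Int)) : (List (Int × Int)) × (List (Int × Int)) × Int :=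
  let st := edge_list.foldl nodeMapStep ([], PySem.Dict.empty, PySem.Dict.empty, 0)
  (st.1, st.2.2.1.items, st.2.2.2)

-- ===== PORT B =====
def node_map_alt (edge_list : List (Int × Int)) : (List (Int × Int)) × (List (Int × Int)) × Int :=
  let nodes := PySem.List.dedup (edge_list.flatMap (fun e => [e.1, e.2]))
  let fwd := PySem.Dict.ofList ((PySem.List.enumerate nodes).map (fun p => (p.2, p.1)))
  let inv := PySem.Dict.ofList (PySem.List.enumerate nodes)
  -- fwd[a], fwd[b]: every edge endpoint is in nodes, so getD is exact
  (edge_list.map (fun e => (fwd.getD e.1 0, fwd.getD e.2 0)), inv.items, (nodes.length : Int))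

-- ===== PRECONDITION & SPEC =====
def Spec_node_map (edge_list : List (Int × Int)) (out : (List (Int × Int)) × (List (Int × Int)) × Int) : Prop := out = node_map_alt edge_list
instance (edge_list : List (Int × Int)) (out : (List (Int × Int)) × (List (Int × Int)) × Int) : Decidable (Spec_node_map edge_list out) := by unfold Spec_node_map; infer_instance

-- ===== CLAIM (what is proved, stated in full; the proofs are below) =====
def Claim_equal_node_map : Prop := ∀ (edge_list : List (Int × Int)), Dom_node_map edge_list → Spec_node_map edge_list (node_map edge_list)

-- ===== LEMMAS AND PROOFS =====

-- fwd / inv dicts determined by the distinct-node list S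
def fwdOf (S : List Int) : PySem.Dict Int Int :=
  PySem.Dict.ofList ((PySem.List.enumerate S).map (fun p => (p.2, p.1)))
def invOf (S : List Int) : PySem.Dict Int Int :=
  PySem.Dict.ofList (PySem.List.enumerate S)

theorem ofList_eq_foldl_insert {κ ν : Type} [BEq κ] (l : List (κ × ν)) :
    PySem.Dict.ofList l = l.foldl (fun d p => d.insert p.1 p.2) PySem.Dict.empty := rfl

theorem enumerate_snoc {α : Type} (S : List α) (a : α) (s : Int) :
    PySem.List.enumerate (S ++ [a]) s = PySem.List.enumerate S s ++ [(s + S.length, a)] := by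
  simp [PySem.List.enumerate_append, PySem.List.enumerate_cons, PySem.List.enumerate_nil]

theorem fwdOf_snoc (S : List Int) (a : Int) :
    fwdOf (S ++ [a]) = (fwdOf S).insert a (S.length : Int) := by
  simp [fwdOf, ofList_eq_foldl_insert, enumerate_snoc]

theorem invOf_snoc (S : List Int) (a : Int) :
    invOf (S ++ [a]) = (invOf S).insert (S.length : Int) a := by
  simp [invOf, ofList_eq_foldl_insert, enumerate_snoc]

theorem contains_fwdOf (S : List Int) (x : Int) :
    (fwdOf S).contains x = decide (x ∈ S) := by
  induction S using List.reverseRecOn with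
  | nil => simp [fwdOf, PySem.List.enumerate_nil, ofList_eq_foldl_insert]
  | append_singleton S a ih =>
      rw [fwdOf_snoc, PySem.Dict.contains_insert, ih]
      by_cases h : x = a <;> simp [h]

theorem getD_fwdOf_update (S : List Int) (m : List Int) (x : Int) (hx : x ∈ S) :
    (fwdOf (PySem.Set.update S m)).getD x 0 = (fwdOf S).getD x 0 := by
  induction m generalizing S with
  | nil => rfl
  | cons y m ih =>
      rw [PySem.Set.update_cons]
      rcases Decidable.em (y ∈ S) with hy | hy
      · rw [PySem.Set.add_of_mem hy]; exact ih S hx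
      · rw [PySem.Set.add_of_not_mem hy, ih (S ++ [y]) (by simp [hx]), fwdOf_snoc,
          PySem.Dict.getD_insert]
        have hne : x ≠ y := fun h => hy (h ▸ hx)
        simp [hne]

-- one "if node not seen yet then register it" half of A's loop body
theorem half_step (S : List Int) (x : Int) :
    (if (fwdOf S).contains x then (fwdOf S, invOf S, (S.length : Int))
     else ((fwdOf S).insert x (S.length : Int), (invOf S).insert (S.length : Int) x,
           (S.length : Int) + 1)) =
      (fwdOf (PySem.Set.add S x), invOf (PySem.Set.add S x),
       ((PySem.Set.add S x).length : Int)) := by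
  rcases Decidable.em (x ∈ S) with h | h
  · rw [PySem.Set.add_of_mem h]; simp [contains_fwdOf, h]
  · rw [PySem.Set.add_of_not_mem h]
    simp [contains_fwdOf, h, fwdOf_snoc, invOf_snoc]

-- A's loop body, expressed through the growing distinct-node list
theorem step_eq (out : List (Int × Int)) (S : List Int) (e : Int × Int) :
    nodeMapStep (out, fwdOf S, invOf S, (S.length : Int)) e =
      (out ++ [((fwdOf (PySem.Set.add (PySem.Set.add S e.1) e.2)).getD e.1 0,
                (fwdOf (PySem.Set.add (PySem.Set.add S e.1) e.2)).getD e.2 0)],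
       fwdOf (PySem.Set.add (PySem.Set.add S e.1) e.2),
       invOf (PySem.Set.add (PySem.Set.add S e.1) e.2),
       ((PySem.Set.add (PySem.Set.add S e.1) e.2).length : Int)) := by
  show (let (fwd, inv, cnt) :=
          if (fwdOf S).contains e.1 then (fwdOf S, invOf S, (S.length : Int))
          else ((fwdOf S).insert e.1 (S.length : Int), (invOf S).insert (S.length : Int) e.1,
                (S.length : Int) + 1)
        let (fwd, inv, cnt) :=
          if fwd.contains e.2 then (fwd, inv, cnt)
          else (fwd.insert e.2 cnt, inv.insert cnt e.2, cnt + 1)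
        (out ++ [(fwd.getD e.1 0, fwd.getD e.2 0)], fwd, inv, cnt)) = _
  rw [half_step]
  show (let (fwd, inv, cnt) :=
          if (fwdOf (PySem.Set.add S e.1)).contains e.2
          then (fwdOf (PySem.Set.add S e.1), invOf (PySem.Set.add S e.1),
                ((PySem.Set.add S e.1).length : Int))
          else ((fwdOf (PySem.Set.add S e.1)).insert e.2 ((PySem.Set.add S e.1).length : Int),
                (invOf (PySem.Set.add S e.1)).insert ((PySem.Set.add S e.1).length : Int) e.2,
                ((PySem.Set.add S e.1).length : Int) + 1)
        (out ++ [(fwd.getD e.1 0, fwd.getD e.2 0)], fwd, inv, cnt)) = _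
  rw [half_step]

-- main invariant: folding A's loop from the state determined by S
theorem foldA_eq (l : List (Int × Int)) (out : List (Int × Int)) (S : List Int) :
    l.foldl nodeMapStep (out, fwdOf S, invOf S, (S.length : Int)) =
      (out ++ l.map (fun e =>
          ((fwdOf (PySem.Set.update S (l.flatMap (fun e => [e.1, e.2])))).getD e.1 0,
           (fwdOf (PySem.Set.update S (l.flatMap (fun e => [e.1, e.2])))).getD e.2 0)),
       fwdOf (PySem.Set.update S (l.flatMap (fun e => [e.1, e.2]))),
       invOf (PySem.Set.update S (l.flatMap (fun e => [e.1, e.2]))),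
       ((PySem.Set.update S (l.flatMap (fun e => [e.1, e.2]))).length : Int)) := by
  induction l generalizing out S with
  | nil => simp [PySem.Set.update_nil]
  | cons e l ih =>
      have hT : PySem.Set.update S ((e :: l).flatMap (fun e => [e.1, e.2])) =
          PySem.Set.update (PySem.Set.add (PySem.Set.add S e.1) e.2)
            (l.flatMap (fun e => [e.1, e.2])) := by
        simp [List.flatMap_cons, PySem.Set.update_cons]
      have h1 : e.1 ∈ PySem.Set.add (PySem.Set.add S e.1) e.2 := by
        simp [PySem.Set.mem_add]
      have h2 : e.2 ∈ PySem.Set.add (PySem.Set.add S e.1) e.2 := by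
        simp [PySem.Set.mem_add]
      rw [List.foldl_cons, step_eq, ih, hT, List.map_cons,
        getD_fwdOf_update _ _ _ h1, getD_fwdOf_update _ _ _ h2]
      simp

-- foldA_eq specialised to A's initial state (definitionally equal to S = [])
theorem foldA_init (l : List (Int × Int)) :
    l.foldl nodeMapStep ([], PySem.Dict.empty, PySem.Dict.empty, 0) =
      (l.map (fun e =>
          ((fwdOf (PySem.Set.update [] (l.flatMap (fun e => [e.1, e.2])))).getD e.1 0,
           (fwdOf (PySem.Set.update [] (l.flatMap (fun e => [e.1, e.2])))).getD e.2 0)),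
       fwdOf (PySem.Set.update [] (l.flatMap (fun e => [e.1, e.2]))),
       invOf (PySem.Set.update [] (l.flatMap (fun e => [e.1, e.2]))),
       ((PySem.Set.update [] (l.flatMap (fun e => [e.1, e.2]))).length : Int)) :=
  foldA_eq l [] []

-- ===== VERDICT (by name: the statement is the Claim_ definition above) =====
theorem node_map_spec : Claim_equal_node_map := by
  intro edge_list _hdom
  unfold Spec_node_map node_map node_map_alt
  have hset : PySem.List.dedup (edge_list.flatMap (fun e => [e.1, e.2])) =
      PySem.Set.update [] (edge_list.flatMap (fun e => [e.1, e.2])) := by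
    simp [PySem.Set.update_nil_left]
  simp only [foldA_init, hset, fwdOf, invOf]
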